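-- pv_equiv track=rewrite | github.com/Arash-H-Jafarizadeh/2D_boundary_driven | source_code/exact_diagonalization/bosonic_sparse_function.py | circuit_edges_1
-- ===== SOURCE A (Python) =====
-- def circuit_edges_1(Nx, Ny):
--     edges = [ [] for _ in range(4)]
--     for row in range(Ny):
--         for col in range(Nx):
--             idx = row * Nx + col
--             if col < Nx - 1 and col % 2 == 0.0 :  #Connection to horizontal neighbors
--                 edges[0].append((idx, idx + 1))
--             if col < Nx - 1 and col % 2 == 1.0 :
--                 edges[1].append((idx, idx + 1))
--             if row < Ny - 1 and row % 2 == 0.0 :  #Connection to vertical neighbors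
--                 edges[2].append((idx, idx + Nx))
--             if row < Ny - 1 and row % 2 == 1.0 :
--                 edges[3].append((idx, idx + Nx))
--
--     return edges
-- ===== SOURCE B (Python) =====
-- def circuit_edges_1(Nx, Ny):
--     e0 = [(r * Nx + c, r * Nx + c + 1) for r in range(Ny) for c in range(0, Nx - 1, 2)]
--     e1 = [(r * Nx + c, r * Nx + c + 1) for r in range(Ny) for c in range(1, Nx - 1, 2)]
--     e2 = [(r * Nx + c, r * Nx + c + Nx) for r in range(0, Ny - 1, 2) for c in range(Nx)]
--     e3 = [(r * Nx + c, r * Nx + c + Nx) for r in range(1, Ny - 1, 2) for c in range(Nx)]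
--     return [e0, e1, e2, e3]
-- ===== Notes on version B (the rewrite author's own statement) =====
-- stated objective: idiomatic
-- what changed: Replaces the single nested cell scan with four parity branches by four independent stepped-range comprehensions (stride-2 ranges select the parity classes directly, no per-cell tests).
import Mathlib
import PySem

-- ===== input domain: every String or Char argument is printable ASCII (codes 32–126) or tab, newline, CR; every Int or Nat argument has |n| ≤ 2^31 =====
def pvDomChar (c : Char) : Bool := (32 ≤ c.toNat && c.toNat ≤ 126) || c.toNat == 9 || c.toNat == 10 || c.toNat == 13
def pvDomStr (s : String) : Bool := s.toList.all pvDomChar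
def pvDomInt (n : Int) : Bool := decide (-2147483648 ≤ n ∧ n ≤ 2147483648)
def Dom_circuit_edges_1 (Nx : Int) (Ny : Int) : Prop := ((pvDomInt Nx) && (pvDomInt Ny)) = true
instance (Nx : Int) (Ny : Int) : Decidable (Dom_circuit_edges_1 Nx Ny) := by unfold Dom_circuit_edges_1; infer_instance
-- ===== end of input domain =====

-- B builds the four edge lists with independent stepped-range comprehensions instead of A's
-- single nested cell scan with per-cell parity branches (objective: idiomatic; same cost).

-- ===== PORT A =====
def circuit_edges_1 (Nx : Int) (Ny : Int) : List (List (Int × Int)) :=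
  let s :=
    (PySem.List.pyRange 0 Ny 1).foldl (fun s row =>
      (PySem.List.pyRange 0 Nx 1).foldl (fun s col =>
        let idx := row * Nx + col
        ((if col < Nx - 1 ∧ PySem.Int.mod col 2 = 0 then s.1 ++ [(idx, idx + 1)] else s.1),
         (if col < Nx - 1 ∧ PySem.Int.mod col 2 = 1 then s.2.1 ++ [(idx, idx + 1)] else s.2.1),
         (if row < Ny - 1 ∧ PySem.Int.mod row 2 = 0 then s.2.2.1 ++ [(idx, idx + Nx)] else s.2.2.1),
         (if row < Ny - 1 ∧ PySem.Int.mod row 2 = 1 then s.2.2.2 ++ [(idx, idx + Nx)] else s.2.2.2))) s)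
      (([] : List (Int × Int)), ([] : List (Int × Int)), ([] : List (Int × Int)), ([] : List (Int × Int)))
  [s.1, s.2.1, s.2.2.1, s.2.2.2]

-- ===== PORT B =====
def circuit_edges_1_alt (Nx : Int) (Ny : Int) : List (List (Int × Int)) :=
  let e0 := (PySem.List.pyRange 0 Ny 1).flatMap (fun r =>
    (PySem.List.pyRange 0 (Nx - 1) 2).map (fun c => (r * Nx + c, r * Nx + c + 1)))
  let e1 := (PySem.List.pyRange 0 Ny 1).flatMap (fun r =>
    (PySem.List.pyRange 1 (Nx - 1) 2).map (fun c => (r * Nx + c, r * Nx + c + 1)))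
  let e2 := (PySem.List.pyRange 0 (Ny - 1) 2).flatMap (fun r =>
    (PySem.List.pyRange 0 Nx 1).map (fun c => (r * Nx + c, r * Nx + c + Nx)))
  let e3 := (PySem.List.pyRange 1 (Ny - 1) 2).flatMap (fun r =>
    (PySem.List.pyRange 0 Nx 1).map (fun c => (r * Nx + c, r * Nx + c + Nx)))
  [e0, e1, e2, e3]

-- ===== PRECONDITION & SPEC =====
def Spec_circuit_edges_1 (Nx : Int) (Ny : Int) (out : List (List (Int × Int))) : Prop := out = circuit_edges_1_alt Nx Ny
instance (Nx : Int) (Ny : Int) (out : List (List (Int × Int))) : Decidable (Spec_circuit_edges_1 Nx Ny out) := by unfold Spec_circuit_edges_1; infer_instance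

-- ===== CLAIM (what is proved, stated in full; the proofs are below) =====
def Claim_equal_circuit_edges_1 : Prop := ∀ (Nx : Int) (Ny : Int), Dom_circuit_edges_1 Nx Ny → Spec_circuit_edges_1 Nx Ny (circuit_edges_1 Nx Ny)

-- ===== LEMMAS AND PROOFS =====

-- a bound conjoined into a filter over range M truncates the range to m
theorem pvRangeFilterLt (p : Nat → Bool) (m M : Nat) (h : m ≤ M) :
    (List.range M).filter (fun k => decide (k < m) && p k) =
      (List.range m).filter p := by
  have : M = m + (M - m) := by omega
  rw [this, List.range_add, List.filter_append]
  have h1 : (List.range m).filter (fun k => decide (k < m) && p k) = (List.range m).filter p := by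
    apply List.filter_congr
    intro x hx
    simp [List.mem_range.mp hx]
  have h2 : ((List.range (M - m)).map (fun k => m + k)).filter (fun k => decide (k < m) && p k) = [] := by
    apply List.filter_eq_nil_iff.mpr
    intro x hx
    simp only [List.mem_map] at hx
    obtain ⟨k, _, rfl⟩ := hx
    simp
  rw [h1, h2, List.append_nil]

-- the evens of range m, in order, are 2*k for k < (m+1)/2
theorem pvNatFilterEven (m : Nat) :
    (List.range m).filter (fun k => decide (k % 2 = 0)) =
      (List.range ((m + 1) / 2)).map (fun k => 2 * k) := by
  induction m with
  | zero => rfl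
  | succ m ih =>
    rw [List.range_succ, List.filter_append, ih]
    by_cases h : m % 2 = 0
    · have h2 : (m + 1 + 1) / 2 = (m + 1) / 2 + 1 := by omega
      have h3 : 2 * ((m + 1) / 2) = m := by omega
      simp [h, h2, List.range_succ, h3]
    · have h2 : (m + 1 + 1) / 2 = (m + 1) / 2 := by omega
      simp [h, h2]

-- the odds of range m, in order, are 2*k+1 for k < m/2
theorem pvNatFilterOdd (m : Nat) :
    (List.range m).filter (fun k => decide (k % 2 = 1)) =
      (List.range (m / 2)).map (fun k => 2 * k + 1) := by
  induction m with
  | zero => rfl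
  | succ m ih =>
    rw [List.range_succ, List.filter_append, ih]
    by_cases h : m % 2 = 1
    · have h2 : (m + 1) / 2 = m / 2 + 1 := by omega
      have h3 : 2 * (m / 2) + 1 = m := by omega
      simp [h, h2, List.range_succ, h3]
    · have h2 : (m + 1) / 2 = m / 2 := by omega
      simp [h, h2]

-- A's even-column filter over range(N) IS the stride-2 range(0, N-1, 2)
theorem pvFilterEvenInt (N : Int) :
    (PySem.List.pyRange 0 N 1).filter (fun c => decide (c < N - 1 ∧ PySem.Int.mod c 2 = 0)) =
      PySem.List.pyRange 0 (N - 1) 2 := by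
  by_cases hN : N ≤ 1
  · have hr : PySem.List.pyRange 0 (N - 1) 2 = [] := by
      rw [PySem.List.pyRange_of_pos 0 (N - 1) (by norm_num)]
      have : ¬ (0 : Int) < N - 1 := by omega
      rw [if_neg this]
      simp
    rw [hr]
    apply List.filter_eq_nil_iff.mpr
    intro c hc
    have hm := (PySem.List.mem_pyRange_one).mp hc
    simp only [Bool.not_eq_true, decide_eq_false_iff_not]
    rintro ⟨h1, _⟩
    omega
  · push Not at hN
    rw [PySem.List.pyRange_one, List.filter_map]
    have hpt : ((fun c => decide (c < N - 1 ∧ PySem.Int.mod c 2 = 0)) ∘ (fun k : Nat => (0 : Int) + k)) =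
        (fun k : Nat => decide (k < (N - 1).toNat) && decide (k % 2 = 0)) := by
      funext k
      simp only [Function.comp]
      rw [PySem.Int.mod_eq_emod_of_pos (by norm_num : (0:Int) < 2)]
      rw [Bool.decide_and]
      congr 1 <;> (apply decide_eq_decide.mpr; omega)
    rw [hpt, pvRangeFilterLt _ _ _ (by omega), pvNatFilterEven, List.map_map]
    rw [PySem.List.pyRange_of_pos 0 (N - 1) (by norm_num)]
    have hcnt : (if (0:Int) < N - 1 then ((N - 1 - 0 + 2 - 1) / 2).toNat else 0) = ((N - 1).toNat + 1) / 2 := by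
      split <;> omega
    rw [hcnt]
    apply List.map_congr_left
    intro k _
    simp only [Function.comp]
    push_cast
    ring

-- A's odd-column filter over range(N) IS the stride-2 range(1, N-1, 2)
theorem pvFilterOddInt (N : Int) :
    (PySem.List.pyRange 0 N 1).filter (fun c => decide (c < N - 1 ∧ PySem.Int.mod c 2 = 1)) =
      PySem.List.pyRange 1 (N - 1) 2 := by
  by_cases hN : N ≤ 2
  · have hr : PySem.List.pyRange 1 (N - 1) 2 = [] := by
      rw [PySem.List.pyRange_of_pos 1 (N - 1) (by norm_num)]
      have : ¬ (1 : Int) < N - 1 := by omega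
      rw [if_neg this]
      simp
    rw [hr]
    apply List.filter_eq_nil_iff.mpr
    intro c hc
    have hm := (PySem.List.mem_pyRange_one).mp hc
    simp only [Bool.not_eq_true, decide_eq_false_iff_not]
    rw [PySem.Int.mod_eq_emod_of_pos (by norm_num : (0:Int) < 2)]
    rintro ⟨h1, h2⟩
    omega
  · push Not at hN
    rw [PySem.List.pyRange_one, List.filter_map]
    have hpt : ((fun c => decide (c < N - 1 ∧ PySem.Int.mod c 2 = 1)) ∘ (fun k : Nat => (0 : Int) + k)) =
        (fun k : Nat => decide (k < (N - 1).toNat) && decide (k % 2 = 1)) := by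
      funext k
      simp only [Function.comp]
      rw [PySem.Int.mod_eq_emod_of_pos (by norm_num : (0:Int) < 2)]
      rw [Bool.decide_and]
      congr 1 <;> (apply decide_eq_decide.mpr; omega)
    rw [hpt, pvRangeFilterLt _ _ _ (by omega), pvNatFilterOdd, List.map_map]
    rw [PySem.List.pyRange_of_pos 1 (N - 1) (by norm_num)]
    have hcnt : (if (1:Int) < N - 1 then ((N - 1 - 1 + 2 - 1) / 2).toNat else 0) = (N - 1).toNat / 2 := by
      split <;> omega
    rw [hcnt]
    apply List.map_congr_left
    intro k _
    simp only [Function.comp]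
    push_cast
    ring

-- a per-element guarded flatMap is a flatMap over the filtered list
theorem pvFlatMapIte {α β : Type} (l : List α) (P : α → Prop) [DecidablePred P] (g : α → List β) :
    (l.flatMap (fun x => if P x then g x else [])) =
      ((l.filter (fun x => decide (P x))).flatMap g) := by
  induction l with
  | nil => rfl
  | cons x t ih =>
    by_cases h : P x <;> simp [List.flatMap_cons, h, ih]

-- one pass of A's inner column loop, evaluated in closed form
theorem pvInner (Nx Ny row : Int)
    (s : List (Int × Int) × List (Int × Int) × List (Int × Int) × List (Int × Int)) :
    (PySem.List.pyRange 0 Nx 1).foldl (fun s col =>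
        let idx := row * Nx + col
        ((if col < Nx - 1 ∧ PySem.Int.mod col 2 = 0 then s.1 ++ [(idx, idx + 1)] else s.1),
         (if col < Nx - 1 ∧ PySem.Int.mod col 2 = 1 then s.2.1 ++ [(idx, idx + 1)] else s.2.1),
         (if row < Ny - 1 ∧ PySem.Int.mod row 2 = 0 then s.2.2.1 ++ [(idx, idx + Nx)] else s.2.2.1),
         (if row < Ny - 1 ∧ PySem.Int.mod row 2 = 1 then s.2.2.2 ++ [(idx, idx + Nx)] else s.2.2.2))) s =
    (s.1 ++ (PySem.List.pyRange 0 (Nx - 1) 2).map (fun c => (row * Nx + c, row * Nx + c + 1)),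
     s.2.1 ++ (PySem.List.pyRange 1 (Nx - 1) 2).map (fun c => (row * Nx + c, row * Nx + c + 1)),
     s.2.2.1 ++ (if row < Ny - 1 ∧ PySem.Int.mod row 2 = 0 then
        (PySem.List.pyRange 0 Nx 1).map (fun c => (row * Nx + c, row * Nx + c + Nx)) else []),
     s.2.2.2 ++ (if row < Ny - 1 ∧ PySem.Int.mod row 2 = 1 then
        (PySem.List.pyRange 0 Nx 1).map (fun c => (row * Nx + c, row * Nx + c + Nx)) else [])) := by
  obtain ⟨a, b, c, d⟩ := s
  rw [PySem.List.foldl_prod_mk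
        (f := fun acc col => if col < Nx - 1 ∧ PySem.Int.mod col 2 = 0 then
          acc ++ [(row * Nx + col, row * Nx + col + 1)] else acc)
        (g := fun acc col =>
          ((if col < Nx - 1 ∧ PySem.Int.mod col 2 = 1 then
              acc.1 ++ [(row * Nx + col, row * Nx + col + 1)] else acc.1),
           (if row < Ny - 1 ∧ PySem.Int.mod row 2 = 0 then
              acc.2.1 ++ [(row * Nx + col, row * Nx + col + Nx)] else acc.2.1),
           (if row < Ny - 1 ∧ PySem.Int.mod row 2 = 1 then
              acc.2.2 ++ [(row * Nx + col, row * Nx + col + Nx)] else acc.2.2)))]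
  rw [PySem.List.foldl_prod_mk
        (f := fun acc col => if col < Nx - 1 ∧ PySem.Int.mod col 2 = 1 then
          acc ++ [(row * Nx + col, row * Nx + col + 1)] else acc)
        (g := fun acc col =>
          ((if row < Ny - 1 ∧ PySem.Int.mod row 2 = 0 then
              acc.1 ++ [(row * Nx + col, row * Nx + col + Nx)] else acc.1),
           (if row < Ny - 1 ∧ PySem.Int.mod row 2 = 1 then
              acc.2 ++ [(row * Nx + col, row * Nx + col + Nx)] else acc.2)))]
  rw [PySem.List.foldl_prod_mk
        (f := fun acc col => if row < Ny - 1 ∧ PySem.Int.mod row 2 = 0 then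
          acc ++ [(row * Nx + col, row * Nx + col + Nx)] else acc)
        (g := fun acc col => if row < Ny - 1 ∧ PySem.Int.mod row 2 = 1 then
          acc ++ [(row * Nx + col, row * Nx + col + Nx)] else acc)]
  refine Prod.ext ?_ (Prod.ext ?_ (Prod.ext ?_ ?_)) <;> simp only
  · rw [PySem.List.foldl_append_ite
          (p := fun col => col < Nx - 1 ∧ PySem.Int.mod col 2 = 0)
          (f := fun col => (row * Nx + col, row * Nx + col + 1)), pvFilterEvenInt]
  · rw [PySem.List.foldl_append_ite
          (p := fun col => col < Nx - 1 ∧ PySem.Int.mod col 2 = 1)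
          (f := fun col => (row * Nx + col, row * Nx + col + 1)), pvFilterOddInt]
  · by_cases h : row < Ny - 1 ∧ PySem.Int.mod row 2 = 0
    · simp only [if_pos h, PySem.List.foldl_append_singleton_eq_map]
    · simp only [if_neg h, PySem.List.foldl_ignore, List.append_nil]
  · by_cases h : row < Ny - 1 ∧ PySem.Int.mod row 2 = 1
    · simp only [if_pos h, PySem.List.foldl_append_singleton_eq_map]
    · simp only [if_neg h, PySem.List.foldl_ignore, List.append_nil]

-- the two programs agree on every input
theorem pvMain (Nx Ny : Int) : circuit_edges_1 Nx Ny = circuit_edges_1_alt Nx Ny := by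
  unfold circuit_edges_1 circuit_edges_1_alt
  simp only
  have hstep : (fun (s : List (Int × Int) × List (Int × Int) × List (Int × Int) × List (Int × Int)) (row : Int) =>
      (PySem.List.pyRange 0 Nx 1).foldl (fun s col =>
        let idx := row * Nx + col
        ((if col < Nx - 1 ∧ PySem.Int.mod col 2 = 0 then s.1 ++ [(idx, idx + 1)] else s.1),
         (if col < Nx - 1 ∧ PySem.Int.mod col 2 = 1 then s.2.1 ++ [(idx, idx + 1)] else s.2.1),
         (if row < Ny - 1 ∧ PySem.Int.mod row 2 = 0 then s.2.2.1 ++ [(idx, idx + Nx)] else s.2.2.1),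
         (if row < Ny - 1 ∧ PySem.Int.mod row 2 = 1 then s.2.2.2 ++ [(idx, idx + Nx)] else s.2.2.2))) s) =
      (fun s row =>
        (s.1 ++ (PySem.List.pyRange 0 (Nx - 1) 2).map (fun c => (row * Nx + c, row * Nx + c + 1)),
         s.2.1 ++ (PySem.List.pyRange 1 (Nx - 1) 2).map (fun c => (row * Nx + c, row * Nx + c + 1)),
         s.2.2.1 ++ (if row < Ny - 1 ∧ PySem.Int.mod row 2 = 0 then
            (PySem.List.pyRange 0 Nx 1).map (fun c => (row * Nx + c, row * Nx + c + Nx)) else []),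
         s.2.2.2 ++ (if row < Ny - 1 ∧ PySem.Int.mod row 2 = 1 then
            (PySem.List.pyRange 0 Nx 1).map (fun c => (row * Nx + c, row * Nx + c + Nx)) else []))) :=
    funext fun s => funext fun row => pvInner Nx Ny row s
  rw [hstep]
  rw [PySem.List.foldl_prod_mk
        (f := fun acc row => acc ++ (PySem.List.pyRange 0 (Nx - 1) 2).map (fun c => (row * Nx + c, row * Nx + c + 1)))
        (g := fun acc row =>
          (acc.1 ++ (PySem.List.pyRange 1 (Nx - 1) 2).map (fun c => (row * Nx + c, row * Nx + c + 1)),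
           acc.2.1 ++ (if row < Ny - 1 ∧ PySem.Int.mod row 2 = 0 then
              (PySem.List.pyRange 0 Nx 1).map (fun c => (row * Nx + c, row * Nx + c + Nx)) else []),
           acc.2.2 ++ (if row < Ny - 1 ∧ PySem.Int.mod row 2 = 1 then
              (PySem.List.pyRange 0 Nx 1).map (fun c => (row * Nx + c, row * Nx + c + Nx)) else [])))]
  rw [PySem.List.foldl_prod_mk
        (f := fun acc row => acc ++ (PySem.List.pyRange 1 (Nx - 1) 2).map (fun c => (row * Nx + c, row * Nx + c + 1)))
        (g := fun acc row =>
          (acc.1 ++ (if row < Ny - 1 ∧ PySem.Int.mod row 2 = 0 then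
              (PySem.List.pyRange 0 Nx 1).map (fun c => (row * Nx + c, row * Nx + c + Nx)) else []),
           acc.2 ++ (if row < Ny - 1 ∧ PySem.Int.mod row 2 = 1 then
              (PySem.List.pyRange 0 Nx 1).map (fun c => (row * Nx + c, row * Nx + c + Nx)) else [])))]
  rw [PySem.List.foldl_prod_mk
        (f := fun acc row => acc ++ (if row < Ny - 1 ∧ PySem.Int.mod row 2 = 0 then
            (PySem.List.pyRange 0 Nx 1).map (fun c => (row * Nx + c, row * Nx + c + Nx)) else []))
        (g := fun acc row => acc ++ (if row < Ny - 1 ∧ PySem.Int.mod row 2 = 1 then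
            (PySem.List.pyRange 0 Nx 1).map (fun c => (row * Nx + c, row * Nx + c + Nx)) else []))]
  simp only [PySem.List.foldl_append_eq_flatMap, List.nil_append]
  rw [pvFlatMapIte (PySem.List.pyRange 0 Ny 1)
        (fun row => row < Ny - 1 ∧ PySem.Int.mod row 2 = 0)
        (fun row => (PySem.List.pyRange 0 Nx 1).map (fun c => (row * Nx + c, row * Nx + c + Nx)))]
  rw [pvFlatMapIte (PySem.List.pyRange 0 Ny 1)
        (fun row => row < Ny - 1 ∧ PySem.Int.mod row 2 = 1)
        (fun row => (PySem.List.pyRange 0 Nx 1).map (fun c => (row * Nx + c, row * Nx + c + Nx)))]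
  rw [pvFilterEvenInt Ny, pvFilterOddInt Ny]

-- ===== VERDICT (by name: the statement is the Claim_ definition above) =====
theorem circuit_edges_1_spec : Claim_equal_circuit_edges_1 := by
  intro Nx Ny _
  unfold Spec_circuit_edges_1
  exact pvMain Nx Ny
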